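-- pv_equiv track=rewrite | github.com/Duckkings/gptroleplayweb | backend/app/services/world_service.py | _infer_zone_type
-- ===== SOURCE A (Python) =====
-- def _infer_zone_type(tags: list[str]) -> str:
--     norm = {t.strip().lower() for t in tags}
--     if {"city", "urban", "town"} & norm:
--         return "city"
--     if {"village", "rural"} & norm:
--         return "village"
--     if {"forest", "wood"} & norm:
--         return "forest"
--     if {"mountain"} & norm:
--         return "mountain"
--     if {"river"} & norm:
--         return "river"
--     if {"desert"} & norm:
--         return "desert"
--     if {"coast", "beach", "sea"} & norm:
--         return "coast"
--     return "unknown"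
-- ===== SOURCE B (Python) =====
-- # B: single-pass running minimum over numeric priority ranks; no per-zone
-- # membership tests, no matched set and no priority-list scan.
-- _RANK = {
--     "city": 0, "urban": 0, "town": 0,
--     "village": 1, "rural": 1,
--     "forest": 2, "wood": 2,
--     "mountain": 3,
--     "river": 4,
--     "desert": 5,
--     "coast": 6, "beach": 6, "sea": 6,
-- }
-- _ZONES = ["city", "village", "forest", "mountain", "river", "desert", "coast"]
--
--
-- def _infer_zone_type(tags: list[str]) -> str:
--     best = 7
--     for t in tags:
--         r = _RANK.get(t.strip().lower(), 7)
--         if r < best: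
--             best = r
--     return _ZONES[best] if best < 7 else "unknown"
-- ===== Notes on version B (the rewrite author's own statement) =====
-- stated objective: alternative
-- what changed: Instead of A's ordered chain of seven set-intersection membership tests with early return, B maps each tag to a numeric priority rank and reduces the whole list to its minimum rank in one fold, then indexes a zone table with that minimum (8 meaning no match).
import Mathlib
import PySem

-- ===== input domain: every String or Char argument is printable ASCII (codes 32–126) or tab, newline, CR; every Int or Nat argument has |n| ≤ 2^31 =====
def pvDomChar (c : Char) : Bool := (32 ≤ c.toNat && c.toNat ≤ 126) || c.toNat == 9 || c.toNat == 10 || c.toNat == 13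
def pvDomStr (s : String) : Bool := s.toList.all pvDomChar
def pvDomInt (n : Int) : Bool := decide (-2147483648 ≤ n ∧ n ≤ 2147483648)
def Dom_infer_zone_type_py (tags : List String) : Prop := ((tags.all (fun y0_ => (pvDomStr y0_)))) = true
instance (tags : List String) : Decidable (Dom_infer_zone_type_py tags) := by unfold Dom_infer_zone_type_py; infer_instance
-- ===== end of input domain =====

-- B replaces A's ordered chain of seven set-intersection tests by a single fold that
-- reduces the tag list to the minimum numeric priority rank, then indexes a zone table
-- (alternative decomposition; same asymptotic cost).

-- ===== PORT A =====
-- norm = {t.strip().lower() for t in tags}; then a chain of truthiness tests on set intersections.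
def infer_zone_type_py (tags : List String) : String :=
  let norm : PySem.Set String :=
    PySem.Set.ofList (tags.map (fun t => PySem.Str.lower (PySem.Str.strip t)))
  if PySem.Set.inter (PySem.Set.ofList ["city", "urban", "town"]) norm ≠ [] then "city"
  else if PySem.Set.inter (PySem.Set.ofList ["village", "rural"]) norm ≠ [] then "village"
  else if PySem.Set.inter (PySem.Set.ofList ["forest", "wood"]) norm ≠ [] then "forest"
  else if PySem.Set.inter (PySem.Set.ofList ["mountain"]) norm ≠ [] then "mountain"
  else if PySem.Set.inter (PySem.Set.ofList ["river"]) norm ≠ [] then "river"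
  else if PySem.Set.inter (PySem.Set.ofList ["desert"]) norm ≠ [] then "desert"
  else if PySem.Set.inter (PySem.Set.ofList ["coast", "beach", "sea"]) norm ≠ [] then "coast"
  else "unknown"

-- ===== PORT B =====
def pvRank : PySem.Dict String Nat :=
  PySem.Dict.ofList
    [("city", 0), ("urban", 0), ("town", 0),
     ("village", 1), ("rural", 1),
     ("forest", 2), ("wood", 2),
     ("mountain", 3),
     ("river", 4),
     ("desert", 5),
     ("coast", 6), ("beach", 6), ("sea", 6)]

def pvZones : List String :=
  ["city", "village", "forest", "mountain", "river", "desert", "coast"]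

-- single pass: best = running minimum of ranks (7 = no match); _ZONES[best] is exact
-- via List.getD since 0 ≤ best < 7 in that branch.
def infer_zone_type_py_alt (tags : List String) : String :=
  let best : Nat := tags.foldl (fun best t =>
    let r := pvRank.getD (PySem.Str.lower (PySem.Str.strip t)) 7
    if r < best then r else best) 7
  if best < 7 then pvZones.getD best "unknown" else "unknown"

-- ===== PRECONDITION & SPEC =====
def Spec_infer_zone_type_py (tags : List String) (out : String) : Prop := out = infer_zone_type_py_alt tags
instance (tags : List String) (out : String) : Decidable (Spec_infer_zone_type_py tags out) := by unfold Spec_infer_zone_type_py; infer_instance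

-- ===== CLAIM (what is proved, stated in full; the proofs are below) =====
def Claim_equal_infer_zone_type_py : Prop := ∀ (tags : List String), Dom_infer_zone_type_py tags → Spec_infer_zone_type_py tags (infer_zone_type_py tags)

-- ===== LEMMAS AND PROOFS =====

-- the keyword groups of A, indexed by B's rank
def pvGroups : Nat → List String
  | 0 => ["city", "urban", "town"]
  | 1 => ["village", "rural"]
  | 2 => ["forest", "wood"]
  | 3 => ["mountain"]
  | 4 => ["river"]
  | 5 => ["desert"]
  | 6 => ["coast", "beach", "sea"]
  | _ => []

-- B's rank table characterised: rank j < 7 is assigned exactly to A's j-th keyword group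
set_option maxHeartbeats 1000000 in
theorem pv_rank_mem (x : String) (j : Nat) (hj : j < 7) :
    pvRank.getD x 7 = j ↔ x ∈ pvGroups j := by
  by_cases e1 : x = "city"
  · subst e1; interval_cases j <;> decide
  ·
    by_cases e2 : x = "urban"
    · subst e2; interval_cases j <;> decide
    ·
      by_cases e3 : x = "town"
      · subst e3; interval_cases j <;> decide
      ·
        by_cases e4 : x = "village"
        · subst e4; interval_cases j <;> decide
        ·
          by_cases e5 : x = "rural"
          · subst e5; interval_cases j <;> decide
          ·
            by_cases e6 : x = "forest"
            · subst e6; interval_cases j <;> decide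
            ·
              by_cases e7 : x = "wood"
              · subst e7; interval_cases j <;> decide
              ·
                by_cases e8 : x = "mountain"
                · subst e8; interval_cases j <;> decide
                ·
                  by_cases e9 : x = "river"
                  · subst e9; interval_cases j <;> decide
                  ·
                    by_cases e10 : x = "desert"
                    · subst e10; interval_cases j <;> decide
                    ·
                      by_cases e11 : x = "coast"
                      · subst e11; interval_cases j <;> decide
                      ·
                        by_cases e12 : x = "beach"
                        · subst e12; interval_cases j <;> decide
                        ·
                          by_cases e13 : x = "sea"
                          · subst e13; interval_cases j <;> decide
                          ·
                            have h7 : pvRank.getD x 7 = 7 := by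
                              rw [show pvRank = PySem.Dict.mk
                                [("city", 0), ("urban", 0), ("town", 0), ("village", 1), ("rural", 1),
                                 ("forest", 2), ("wood", 2), ("mountain", 3), ("river", 4), ("desert", 5),
                                 ("coast", 6), ("beach", 6), ("sea", 6)] from rfl,
                                PySem.Dict.getD_eq_get?_getD]
                              simp [beq_iff_eq, Ne.symm e1, Ne.symm e2, Ne.symm e3, Ne.symm e4, Ne.symm e5, Ne.symm e6, Ne.symm e7, Ne.symm e8, Ne.symm e9, Ne.symm e10, Ne.symm e11, Ne.symm e12, Ne.symm e13, PySem.Dict.get?]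
                            rw [h7]
                            interval_cases j <;> simp [pvGroups, e1, e2, e3, e4, e5, e6, e7, e8, e9, e10, e11, e12, e13]

-- running-minimum fold: bounded by the initial value
theorem pv_fold_le_init (g : String → Nat) (l : List String) (a : Nat) :
    l.foldl (fun b t => if g t < b then g t else b) a ≤ a := by
  induction l generalizing a with
  | nil => simp
  | cons u us ih =>
    simp only [List.foldl_cons]
    calc us.foldl (fun b t => if g t < b then g t else b) (if g u < a then g u else a)
        ≤ (if g u < a then g u else a) := ih _
      _ ≤ a := by split <;> omega

-- running-minimum fold: lower bound by any member
theorem pv_fold_le (g : String → Nat) (l : List String) (a : Nat) :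
    ∀ t ∈ l, l.foldl (fun b t => if g t < b then g t else b) a ≤ g t := by
  induction l generalizing a with
  | nil => intro t ht; cases ht
  | cons u us ih =>
    intro t ht
    simp only [List.foldl_cons]
    rcases List.mem_cons.mp ht with rfl | ht
    · calc us.foldl (fun b t => if g t < b then g t else b) (if g t < a then g t else a)
          ≤ (if g t < a then g t else a) := pv_fold_le_init g us _
        _ ≤ g t := by split <;> omega
    · exact ih _ t ht

-- running-minimum fold: the result is the initial value or the rank of some member
theorem pv_fold_cases (g : String → Nat) (l : List String) (a : Nat) :
    l.foldl (fun b t => if g t < b then g t else b) a = a ∨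
      ∃ t ∈ l, l.foldl (fun b t => if g t < b then g t else b) a = g t := by
  induction l generalizing a with
  | nil => simp
  | cons u us ih =>
    simp only [List.foldl_cons]
    rcases ih (if g u < a then g u else a) with h | ⟨t, ht, h⟩
    · by_cases hu : g u < a
      · exact Or.inr ⟨u, List.mem_cons_self, by rw [h, if_pos hu]⟩
      · exact Or.inl (by rw [h, if_neg hu])
    · exact Or.inr ⟨t, List.mem_cons_of_mem _ ht, h⟩

-- A's intersection-nonempty tests, as an existential over the tags
theorem pv_inter_ne_nil (G : List String) (l : List String) :
    PySem.Set.inter (PySem.Set.ofList G) (PySem.Set.ofList l) ≠ [] ↔ ∃ k ∈ G, k ∈ l := by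
  rw [← List.isEmpty_eq_false_iff, List.isEmpty_eq_false_iff_exists_mem]
  constructor
  · rintro ⟨k, hk⟩
    rw [PySem.Set.mem_inter] at hk
    exact ⟨k, by simpa [PySem.Set.mem_ofList] using hk.1, by simpa [PySem.Set.mem_ofList] using hk.2⟩
  · rintro ⟨k, hG, hl⟩
    exact ⟨k, by rw [PySem.Set.mem_inter]; simp [PySem.Set.mem_ofList, hG, hl]⟩

-- ===== VERDICT (by name: the statement is the Claim_ definition above) =====
theorem infer_zone_type_py_spec : Claim_equal_infer_zone_type_py := by
  intro tags _
  unfold Spec_infer_zone_type_py infer_zone_type_py infer_zone_type_py_alt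
  have hA : ∀ G : List String,
      (PySem.Set.inter (PySem.Set.ofList G)
        (PySem.Set.ofList (tags.map (fun t => PySem.Str.lower (PySem.Str.strip t)))) ≠ []) ↔
      ∃ t ∈ tags, PySem.Str.lower (PySem.Str.strip t) ∈ G := by
    intro G
    rw [pv_inter_ne_nil]
    constructor
    · rintro ⟨k, hG, hk⟩
      obtain ⟨t, ht, rfl⟩ := List.mem_map.mp hk
      exact ⟨t, ht, hG⟩
    · rintro ⟨t, ht, hG⟩
      exact ⟨_, hG, List.mem_map_of_mem ht⟩
  set M : Nat := tags.foldl (fun best t =>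
      let r := pvRank.getD (PySem.Str.lower (PySem.Str.strip t)) 7
      if r < best then r else best) 7 with hMdef
  have hM_le : ∀ t ∈ tags, M ≤ pvRank.getD (PySem.Str.lower (PySem.Str.strip t)) 7 :=
    pv_fold_le (fun t => pvRank.getD (PySem.Str.lower (PySem.Str.strip t)) 7) tags 7
  have hM_cases : M = 7 ∨ ∃ t ∈ tags, M = pvRank.getD (PySem.Str.lower (PySem.Str.strip t)) 7 :=
    pv_fold_cases (fun t => pvRank.getD (PySem.Str.lower (PySem.Str.strip t)) 7) tags 7
  have hMle : ∀ j : Nat, j < 7 →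
      (∃ t ∈ tags, PySem.Str.lower (PySem.Str.strip t) ∈ pvGroups j) → M ≤ j := by
    rintro j hj ⟨t, ht, hg⟩
    have := hM_le t ht
    rwa [(pv_rank_mem _ j hj).mpr hg] at this
  have hMne : ∀ j : Nat, j < 7 →
      ¬ (∃ t ∈ tags, PySem.Str.lower (PySem.Str.strip t) ∈ pvGroups j) → M ≠ j := by
    intro j hj hno hMj
    rcases hM_cases with h7 | ⟨t, ht, hgt⟩
    · omega
    · exact hno ⟨t, ht, (pv_rank_mem _ j hj).mp (by omega)⟩
  by_cases h0 : ∃ t ∈ tags, PySem.Str.lower (PySem.Str.strip t) ∈ pvGroups 0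
  · have hM0 : M = 0 := by
      have := hMle 0 (by norm_num) h0
      omega
    rw [if_pos ((hA ["city", "urban", "town"]).mpr h0), hM0]
    rfl
  · rw [if_neg (fun hc => h0 ((hA ["city", "urban", "town"]).mp hc))]
    by_cases h1 : ∃ t ∈ tags, PySem.Str.lower (PySem.Str.strip t) ∈ pvGroups 1
    · have hM1 : M = 1 := by
        have := hMle 1 (by norm_num) h1
        have := hMne 0 (by norm_num) h0
        omega
      rw [if_pos ((hA ["village", "rural"]).mpr h1), hM1]
      rfl
    · rw [if_neg (fun hc => h1 ((hA ["village", "rural"]).mp hc))]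
      by_cases h2 : ∃ t ∈ tags, PySem.Str.lower (PySem.Str.strip t) ∈ pvGroups 2
      · have hM2 : M = 2 := by
          have := hMle 2 (by norm_num) h2
          have := hMne 0 (by norm_num) h0
          have := hMne 1 (by norm_num) h1
          omega
        rw [if_pos ((hA ["forest", "wood"]).mpr h2), hM2]
        rfl
      · rw [if_neg (fun hc => h2 ((hA ["forest", "wood"]).mp hc))]
        by_cases h3 : ∃ t ∈ tags, PySem.Str.lower (PySem.Str.strip t) ∈ pvGroups 3
        · have hM3 : M = 3 := by
            have := hMle 3 (by norm_num) h3
            have := hMne 0 (by norm_num) h0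
            have := hMne 1 (by norm_num) h1
            have := hMne 2 (by norm_num) h2
            omega
          rw [if_pos ((hA ["mountain"]).mpr h3), hM3]
          rfl
        · rw [if_neg (fun hc => h3 ((hA ["mountain"]).mp hc))]
          by_cases h4 : ∃ t ∈ tags, PySem.Str.lower (PySem.Str.strip t) ∈ pvGroups 4
          · have hM4 : M = 4 := by
              have := hMle 4 (by norm_num) h4
              have := hMne 0 (by norm_num) h0
              have := hMne 1 (by norm_num) h1
              have := hMne 2 (by norm_num) h2
              have := hMne 3 (by norm_num) h3
              omega
            rw [if_pos ((hA ["river"]).mpr h4), hM4]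
            rfl
          · rw [if_neg (fun hc => h4 ((hA ["river"]).mp hc))]
            by_cases h5 : ∃ t ∈ tags, PySem.Str.lower (PySem.Str.strip t) ∈ pvGroups 5
            · have hM5 : M = 5 := by
                have := hMle 5 (by norm_num) h5
                have := hMne 0 (by norm_num) h0
                have := hMne 1 (by norm_num) h1
                have := hMne 2 (by norm_num) h2
                have := hMne 3 (by norm_num) h3
                have := hMne 4 (by norm_num) h4
                omega
              rw [if_pos ((hA ["desert"]).mpr h5), hM5]
              rfl
            · rw [if_neg (fun hc => h5 ((hA ["desert"]).mp hc))]
              by_cases h6 : ∃ t ∈ tags, PySem.Str.lower (PySem.Str.strip t) ∈ pvGroups 6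
              · have hM6 : M = 6 := by
                  have := hMle 6 (by norm_num) h6
                  have := hMne 0 (by norm_num) h0
                  have := hMne 1 (by norm_num) h1
                  have := hMne 2 (by norm_num) h2
                  have := hMne 3 (by norm_num) h3
                  have := hMne 4 (by norm_num) h4
                  have := hMne 5 (by norm_num) h5
                  omega
                rw [if_pos ((hA ["coast", "beach", "sea"]).mpr h6), hM6]
                rfl
              · rw [if_neg (fun hc => h6 ((hA ["coast", "beach", "sea"]).mp hc))]
                have hnone : ∀ j : Nat, j < 7 →
                    ¬ (∃ t ∈ tags, PySem.Str.lower (PySem.Str.strip t) ∈ pvGroups j) := by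
                  intro j hj
                  interval_cases j <;> assumption
                have hnot : ¬ M < 7 := by
                  intro hlt
                  rcases hM_cases with h7 | ⟨t, ht, hgt⟩
                  · omega
                  · exact hnone M hlt ⟨t, ht, (pv_rank_mem _ M hlt).mp hgt.symm⟩
                rw [if_neg hnot]
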